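-- pv_equiv track=rewrite | github.com/CipiOrhei/eecvf | Utils/plotting.py | get_table_data_from_csv
-- ===== SOURCE A (Python) =====
-- def get_table_data_from_csv(content: str, table_number: int) -> dict:
--     """
--     Get data from csv file produced by the APPL block into a dictionary.
--     :param content: csv data
--     :param table_number: csv can have multiple tables inside
--     :return: dictionary with the data
--     """
--     tables = []
--     for el in content.split('Frame'):
--         if el is not '':
--             tables.append('Frame' + el)
--     # create dict to hold data
--     table_dict = {k: [] for k in (tables[table_number - 1].split(',False\n'))[0].split(',')}
--     keys_dict = list(table_dict.keys())
--
--     for element in (tables[table_number - 1].split(',False\n'))[1:]: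
--         data = element.split(',')
--         if data != ['']:
--             for index in range(len(keys_dict)):
--                 table_dict[keys_dict[index]].append(data[index])
--
--     return table_dict
-- ===== SOURCE B (Python) =====
-- def get_table_data_from_csv(content: str, table_number: int) -> dict:
--     """Flatten-and-stride: pour every kept row's first-n fields into ONE flat
--     row-major list, then recover column j as the stride slice flat[j::n]."""
--     tables = ['Frame' + el for el in content.split('Frame') if el != '']
--     segments = tables[table_number - 1].split(',False\n')
--     keys = list(dict.fromkeys(segments[0].split(',')))
--     n = len(keys)
--     rows = [r for r in (seg.split(',') for seg in segments[1:]) if r != ['']]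
--     flat = [row[i] for row in rows for i in range(n)]
--     return {keys[j]: flat[j::n] for j in range(n)}
-- ===== Notes on version B (the rewrite author's own statement) =====
-- stated objective: alternative
-- what changed: A fills the dictionary row-major, appending field-by-field into a per-key list during one pass over the rows; B pours every kept row's first-n fields into ONE flat row-major list and then recovers column j as the arithmetic-stride slice flat[j::n], pairing it with the j-th deduplicated header key.
import Mathlib
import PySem

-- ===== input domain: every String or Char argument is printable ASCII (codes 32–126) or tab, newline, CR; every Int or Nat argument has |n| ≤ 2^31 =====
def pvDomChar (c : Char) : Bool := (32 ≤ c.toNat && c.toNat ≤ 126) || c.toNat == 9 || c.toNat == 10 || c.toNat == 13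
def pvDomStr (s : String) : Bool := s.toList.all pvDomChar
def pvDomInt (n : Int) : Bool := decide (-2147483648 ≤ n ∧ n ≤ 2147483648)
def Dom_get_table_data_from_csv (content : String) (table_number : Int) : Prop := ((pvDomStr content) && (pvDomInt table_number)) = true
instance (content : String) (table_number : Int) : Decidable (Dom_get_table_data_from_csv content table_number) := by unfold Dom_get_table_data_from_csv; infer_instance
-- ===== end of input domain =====

-- B flattens the kept rows' first-n fields into one row-major list and recovers each
-- column as the stride slice flat[j::n], instead of A's per-key append-into-dict row loop;
-- objective: alternative decomposition.

-- ===== PORT A =====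
def get_table_data_from_csv (content : String) (table_number : Int) : List (String × List String) :=
  let tables : List String :=
    ((PySem.Str.split? content "Frame").getD []).foldl
      (fun acc el => if el ≠ "" then acc ++ ["Frame" ++ el] else acc) []
  -- tables[table_number - 1]: Pre_ guarantees the index is in range (else Python raises IndexError)
  let segs : List String :=
    (PySem.Str.split? (PySem.List.pyGetD tables (table_number - 1) "") ",False\n").getD []
  let table_dict : PySem.Dict String (List String) :=
    ((PySem.Str.split? (PySem.List.pyGetD segs 0 "") ",").getD []).foldl
      (fun d k => d.insert k []) PySem.Dict.empty
  let keys_dict : List String := table_dict.keys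
  let final : PySem.Dict String (List String) :=
    (PySem.List.slice segs (some 1) none).foldl
      (fun d element =>
        let data := (PySem.Str.split? element ",").getD []
        if data ≠ [""] then
          (PySem.List.pyRange 0 (keys_dict.length : Int) 1).foldl
            (fun d index =>
              -- data[index]: Pre_ guarantees index < data.length (else Python raises IndexError)
              d.modify (PySem.List.pyGetD keys_dict index "") []
                (fun v => v ++ [PySem.List.pyGetD data index ""])) d
        else d)
      table_dict
  final.items

-- ===== PORT B =====
def get_table_data_from_csv_alt (content : String) (table_number : Int) : List (String × List String) :=
  let tables : List String :=
    (((PySem.Str.split? content "Frame").getD []).filter (fun el => el ≠ "")).map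
      (fun el => "Frame" ++ el)
  let segments : List String :=
    (PySem.Str.split? (PySem.List.pyGetD tables (table_number - 1) "") ",False\n").getD []
  -- keys = list(dict.fromkeys(...)) = the distinct header fields in first-occurrence order
  let keys : List String :=
    PySem.Set.ofList ((PySem.Str.split? (PySem.List.pyGetD segments 0 "") ",").getD [])
  let n : Nat := keys.length
  let rows : List (List String) :=
    ((PySem.List.slice segments (some 1) none).map
        (fun seg => (PySem.Str.split? seg ",").getD [])).filter (fun r => r ≠ [""])
  -- flat = [row[i] for row in rows for i in range(n)]; row[i] in range by Pre_
  let flat : List String :=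
    rows.flatMap (fun row =>
      (PySem.List.pyRange 0 (n : Int) 1).map (fun i => PySem.List.pyGetD row i ""))
  -- {keys[j]: flat[j::n] for j in range(n)}: keys are distinct, so insertion order is range
  -- order and the dict comprehension is exactly this map; slice? is some since n ≥ 1 > 0
  (PySem.List.pyRange 0 (n : Int) 1).map
    (fun j => (PySem.List.pyGetD keys j "",
      (PySem.List.slice? flat (some j) none (n : Int)).getD []))

-- ===== PRECONDITION & SPEC =====
-- Pre_ excludes exactly the inputs where Python A raises IndexError: a table index out of
-- range, or a kept data row shorter than the deduplicated header.
def Pre_get_table_data_from_csv (content : String) (table_number : Int) : Prop :=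
  let tables : List String :=
    (((PySem.Str.split? content "Frame").getD []).filter (fun el => el ≠ "")).map
      (fun el => "Frame" ++ el)
  let segments : List String :=
    (PySem.Str.split? (PySem.List.pyGetD tables (table_number - 1) "") ",False\n").getD []
  let nkeys : Nat :=
    (PySem.Set.ofList ((PySem.Str.split? (PySem.List.pyGetD segments 0 "") ",").getD []) : List String).length
  PySem.Raise.InRange tables.length (table_number - 1) ∧
  ∀ r ∈ (segments.drop 1).map (fun seg => (PySem.Str.split? seg ",").getD []),
      r ≠ [""] → nkeys ≤ r.length

instance (content : String) (table_number : Int) : Decidable (Pre_get_table_data_from_csv content table_number) := by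
  unfold Pre_get_table_data_from_csv; infer_instance

def pvWitness_get_table_data_from_csv : String × Int := ("Framea,b,False\n1,2,False\n", 1)

def Spec_get_table_data_from_csv (content : String) (table_number : Int) (out : List (String × List String)) : Prop := out = get_table_data_from_csv_alt content table_number
instance (content : String) (table_number : Int) (out : List (String × List String)) : Decidable (Spec_get_table_data_from_csv content table_number out) := by unfold Spec_get_table_data_from_csv; infer_instance

-- ===== CLAIM (what is proved, stated in full; the proofs are below) =====
def Claim_equal_get_table_data_from_csv : Prop := ∀ (content : String) (table_number : Int), Dom_get_table_data_from_csv content table_number → Pre_get_table_data_from_csv content table_number → Spec_get_table_data_from_csv content table_number (get_table_data_from_csv content table_number)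


-- ===== LEMMAS AND PROOFS =====

theorem pv_contains_iff_mem_keys (d : PySem.Dict String (List String)) (k : String) :
    d.contains k = true ↔ k ∈ d.keys := by
  obtain ⟨l⟩ := d
  simp only [PySem.Dict.contains_mk, PySem.Dict.keys_mk, List.any_eq_true, beq_iff_eq,
    List.mem_map]

theorem pv_keys_insert (d : PySem.Dict String (List String)) (k : String) (v : List String) :
    (d.insert k v).keys = PySem.Set.add d.keys k := by
  have hkeys : ∀ e : PySem.Dict String (List String), e.keys = e.items.map (·.1) := fun e => rfl
  rw [hkeys, PySem.Dict.items_insert, PySem.Set.add_eq_ite]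
  by_cases hc : d.contains k = true
  · rw [if_pos hc, if_pos ((pv_contains_iff_mem_keys d k).mp hc), List.map_map, hkeys]
    apply List.map_congr_left
    intro p _
    by_cases hp : (p.1 == k) = true
    · simp [Function.comp, eq_of_beq hp]
    · simp [Function.comp, hp]
  · rw [if_neg hc, if_neg (fun hm => hc ((pv_contains_iff_mem_keys d k).mpr hm)),
      List.map_append, hkeys]
    rfl

theorem pv_keys_foldl_modify_pairs (l : List (String × String))
    (d : PySem.Dict String (List String)) :
    (l.foldl (fun d p => d.modify p.1 [] (fun v => v ++ [p.2])) d).keys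
      = PySem.Set.update d.keys (l.map (·.1)) := by
  induction l generalizing d with
  | nil => rfl
  | cons p l ih =>
    rw [List.foldl_cons, ih, List.map_cons, PySem.Set.update_cons,
      PySem.Dict.keys_modify, pv_keys_insert]


theorem pv_keys_foldl_insert_empty (l : List String) :
    (l.foldl (fun d k => d.insert k ([] : List String)) PySem.Dict.empty).keys
      = (PySem.Set.ofList l : List String) := by
  rw [PySem.Dict.keys_foldl_insert]
  rw [PySem.Set.update_eq_append_filter]
  simp [PySem.Dict.empty, PySem.Dict.keys_mk, PySem.Set.contains]

theorem pv_items_eq_map_keys (d : PySem.Dict String (List String)) (h : d.keys.Nodup) :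
    d.items = d.keys.map (fun k => (k, d.getD k [])) := by
  obtain ⟨l⟩ := d
  induction l with
  | nil => rfl
  | cons p l ih =>
    obtain ⟨k, v⟩ := p
    simp only [PySem.Dict.keys_mk, List.map_cons, List.map_map] at h ⊢
    rcases List.nodup_cons.mp h with ⟨hk, hnd⟩
    simp only [List.mem_map] at hk
    rw [List.cons_eq_cons]
    refine ⟨?_, ?_⟩
    · simp [PySem.Dict.getD, PySem.Dict.get?_mk_cons]
    · have ihl : l = List.map (fun k => (k, (PySem.Dict.mk l).getD k []))
          (List.map (fun x => x.1) l) := by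
        simpa [PySem.Dict.keys_mk] using ih hnd
      conv_lhs => rw [ihl]
      rw [List.map_map]
      apply List.map_congr_left
      intro q hq
      have hne : (k == q.1) = false :=
        beq_eq_false_iff_ne.mpr (fun he => hk ⟨q, hq, he.symm⟩)
      simp [Function.comp, PySem.Dict.getD, PySem.Dict.get?_mk_cons, hne]

theorem pv_init_items (l : List String) :
    (l.foldl (fun d k => d.insert k ([] : List String)) PySem.Dict.empty).items
      = (PySem.Set.ofList l : List String).map (fun k => (k, ([] : List String))) := by
  induction l using List.reverseRecOn with
  | nil => rfl
  | append_singleton l k ih =>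
    rw [List.foldl_append, List.foldl_cons, List.foldl_nil, PySem.Set.ofList_append_singleton]
    by_cases hm : k ∈ (PySem.Set.ofList l : List String)
    · rw [PySem.Set.add_of_mem hm]
      have hcont : (l.foldl (fun d k => d.insert k ([] : List String)) PySem.Dict.empty).contains k = true := by
        rw [pv_contains_iff_mem_keys, pv_keys_foldl_insert_empty]; exact hm
      rw [PySem.Dict.items_insert, if_pos hcont, ih, List.map_map]
      apply List.map_congr_left
      intro a _
      by_cases hak : (a == k) = true
      · simp [Function.comp, eq_of_beq hak]
      · simp [Function.comp, hak]
    · rw [PySem.Set.add_of_not_mem hm]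
      have hcont : (l.foldl (fun d k => d.insert k ([] : List String)) PySem.Dict.empty).contains k = false := by
        rw [Bool.eq_false_iff, Ne, pv_contains_iff_mem_keys, pv_keys_foldl_insert_empty]
        exact hm
      rw [PySem.Dict.items_insert, if_neg (by simp [hcont]), ih, List.map_append]
      rfl


theorem pv_filter_zip_not_mem (ks row : List String) (c : String) (hc : c ∉ ks) :
    (ks.zip row).filter (fun p => p.1 == c) = [] := by
  induction ks generalizing row with
  | nil => simp
  | cons k ks ih =>
    cases row with
    | nil => simp
    | cons r row =>
      simp only [List.zip_cons_cons, List.filter_cons]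
      simp only [List.mem_cons, not_or] at hc
      have hk : (k == c) = false := by
        exact beq_eq_false_iff_ne.mpr (fun h => hc.1 h.symm)
      simp [hk, ih _ hc.2]

theorem pv_filter_zip (ks row : List String) (i : Nat) (hnd : ks.Nodup)
    (hi : i < ks.length) (hlen : ks.length ≤ row.length) :
    (ks.zip row).filter (fun p => p.1 == ks[i]) = [(ks[i], row.getD i "")] := by
  induction ks generalizing row i with
  | nil => simp at hi
  | cons k ks ih =>
    cases row with
    | nil => simp at hlen
    | cons r row =>
      rcases List.nodup_cons.mp hnd with ⟨hk, hnd'⟩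
      cases i with
      | zero =>
        simp only [List.zip_cons_cons, List.filter_cons, List.getElem_cons_zero,
          BEq.rfl, List.getD_cons_zero]
        simp [pv_filter_zip_not_mem ks row k hk]
      | succ i =>
        have hi' : i < ks.length := by simpa using hi
        have hne : (k == ks[i]) = false := by
          have : ks[i] ∈ ks := List.getElem_mem hi'
          simp only [beq_eq_false_iff_ne]
          intro h; exact hk (h ▸ this)
        simp only [List.zip_cons_cons, List.filter_cons, List.getElem_cons_succ,
          List.getD_cons_succ, hne]
        simpa using ih row i hnd' hi' (by simpa using hlen)

theorem pv_getD_init (l : List String) (c : String) :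
    (PySem.Dict.mk (l.map (fun k => (k, ([] : List String))))).getD c [] = [] := by
  induction l with
  | nil => simp [PySem.Dict.getD, PySem.Dict.get?]
  | cons k l ih =>
    simp only [List.map_cons]
    by_cases h : (k == c) = true
    · simp [PySem.Dict.getD, PySem.Dict.get?_mk_cons, h]
    · simp only [PySem.Dict.getD, PySem.Dict.get?_mk_cons, h] at ih ⊢
      simpa [PySem.Dict.getD] using ih

theorem pv_foldl_if_map_filter {γ : Type} (l : List String) (m : String → List String)
    (h : γ → List String → γ) (init : γ) :
    l.foldl (fun d x => if m x ≠ [""] then h d (m x) else d) init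
      = ((l.map m).filter (fun r => r ≠ [""])).foldl h init := by
  induction l generalizing init with
  | nil => rfl
  | cons a l ih =>
    simp only [List.foldl_cons, List.map_cons, List.filter_cons]
    by_cases hp : m a ≠ [""]
    · rw [if_pos hp, decide_eq_true hp, ih]
      rfl
    · rw [if_neg hp, decide_eq_false hp, ih]
      rfl

theorem pv_range_fold_zip {γ : Type} (ks row : List String) (h : ks.length ≤ row.length)
    (G : γ → String → String → γ) (d : γ) :
    (List.range ks.length).foldl (fun d i => G d (ks.getD i "") (row.getD i "")) d
      = (ks.zip row).foldl (fun d p => G d p.1 p.2) d := by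
  induction ks generalizing row d with
  | nil => simp
  | cons k ks ih =>
    cases row with
    | nil => simp at h
    | cons r row =>
      simp only [List.length_cons, List.range_succ_eq_map, List.foldl_cons, List.foldl_map,
        List.getD_cons_zero, List.getD_cons_succ, List.zip_cons_cons]
      exact ih row (by simpa using h) (G d k r)

theorem pv_filter_flatMap {A B : Type} (p : B → Bool) (f : A → List B) (l : List A) :
    (l.flatMap f).filter p = l.flatMap (fun a => (f a).filter p) := by
  induction l with
  | nil => rfl
  | cons a l ih => simp [List.flatMap_cons, List.filter_append, ih]

theorem pv_flatMap_pair_snd (rows : List (List String)) (k : String)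
    (g : List String → String) :
    (rows.flatMap (fun row => [(k, g row)])).map (·.2) = rows.map g := by
  induction rows with
  | nil => rfl
  | cons r rows ih => simp only [List.flatMap_cons, List.map_append, List.map_cons, ih]; rfl

theorem pv_core (keysAll : List String) (rows : List (List String))
    (hlen : ∀ r ∈ rows, (PySem.Set.ofList keysAll : List String).length ≤ r.length) :
    (rows.foldl
        (fun d row =>
          (PySem.List.pyRange 0
              ((((keysAll.foldl (fun d k => d.insert k ([] : List String)) PySem.Dict.empty).keys).length : Int)) 1).foldl
            (fun d index =>
              d.modify
                (PySem.List.pyGetD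
                  (keysAll.foldl (fun d k => d.insert k ([] : List String)) PySem.Dict.empty).keys index "") []
                (fun v => v ++ [PySem.List.pyGetD row index ""])) d)
        (keysAll.foldl (fun d k => d.insert k ([] : List String)) PySem.Dict.empty)).items
      = (PySem.List.enumerate (PySem.Set.ofList keysAll)).map
          (fun p => (p.2, rows.map (fun row => PySem.List.pyGetD row p.1 ""))) := by
  have hkeys0 := pv_keys_foldl_insert_empty keysAll
  set ks : List String := (PySem.Set.ofList keysAll : List String) with hks
  set d0 : PySem.Dict String (List String) :=
    keysAll.foldl (fun d k => d.insert k ([] : List String)) PySem.Dict.empty with hd0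
  have hnd : ks.Nodup := PySem.Set.nodup_ofList keysAll
  -- step 1: each row's range-fold is the fold over (ks.zip row)
  rw [PySem.List.foldl_congr_mem rows _
    (fun d row => (ks.zip row).foldl (fun d p => d.modify p.1 [] (fun v => v ++ [p.2])) d) d0 ?hcg]
  case hcg =>
    intro acc row hrow
    rw [hkeys0, PySem.List.pyRange_zero_natCast, List.foldl_map]
    simp only [PySem.List.pyGetD_natCast]
    exact pv_range_fold_zip ks row (hlen row hrow)
      (fun d a b => d.modify a [] (fun v => v ++ [b])) acc
  -- step 2: fold of folds = fold over the flat list of (key, field) pairs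
  rw [← List.foldl_flatMap]
  -- step 3: the modify loop keeps exactly the keys ks
  have hFkeys : ((rows.flatMap (fun row => ks.zip row)).foldl
      (fun d p => d.modify p.1 [] (fun v => v ++ [p.2])) d0).keys = ks := by
    rw [pv_keys_foldl_modify_pairs, hkeys0, PySem.Set.update_eq_append_filter]
    have hmem : ∀ y ∈ (PySem.Set.ofList ((rows.flatMap (fun row => ks.zip row)).map (·.1)) : List String),
        y ∈ ks := by
      intro y hy
      rw [PySem.Set.mem_ofList] at hy
      obtain ⟨p, hp, rfl⟩ := List.mem_map.mp hy
      obtain ⟨row, _, hpz⟩ := List.mem_flatMap.mp hp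
      exact (List.of_mem_zip hpz).1
    rw [List.filter_eq_nil_iff.mpr (fun y hy => by simp [hmem y hy]), List.append_nil]
  -- step 4: the value stored at key ks[i] is exactly the i-th column
  have hval : ∀ (i : Nat) (hi : i < ks.length),
      ((rows.flatMap (fun row => ks.zip row)).foldl
        (fun d p => d.modify p.1 [] (fun v => v ++ [p.2])) d0).getD ks[i] []
      = rows.map (fun row => row.getD i "") := by
    intro i hi
    have hd0eq : d0 = PySem.Dict.mk (ks.map (fun k => (k, ([] : List String)))) :=
      PySem.Dict.ext (pv_init_items keysAll)
    rw [PySem.Dict.getD_foldl_modify_append, hd0eq, pv_getD_init, List.nil_append]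
    have hfil : (rows.flatMap (fun row => ks.zip row)).filter (fun p => p.1 == ks[i])
        = rows.flatMap (fun row => [(ks[i], row.getD i "")]) := by
      rw [pv_filter_flatMap, List.flatMap_def, List.flatMap_def]
      exact congrArg List.flatten (List.map_congr_left
        (fun row hr => pv_filter_zip ks row i hnd hi (hlen row hr)))
    rw [hfil]
    exact pv_flatMap_pair_snd rows ks[i] (fun row => row.getD i "")
  -- step 5: read the items off through the keys and compare columnwise
  rw [pv_items_eq_map_keys _ (by rw [hFkeys]; exact hnd), hFkeys]
  apply List.ext_getElem
  · simp [PySem.List.enumerate_eq_zipIdx_map]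
  intro i h1 h2
  have hi : i < ks.length := by simpa using h1
  simp only [List.getElem_map, PySem.List.enumerate_eq_zipIdx_map, List.getElem_zipIdx,
    zero_add, PySem.List.pyGetD_natCast]
  rw [hval i hi]

-- B-side: stride slicing. flat[j::n] over blocks of exact length n picks field j of each block.
theorem pv_stride_filterMap (bs : List (List String)) (n j : Nat) (hj : j < n)
    (hb : ∀ b ∈ bs, b.length = n) :
    (List.range bs.length).filterMap (fun k => bs.flatten[j + n * k]?)
      = bs.map (fun b => b.getD j "") := by
  induction bs with
  | nil => rfl
  | cons b bs ih =>
    have hbn : b.length = n := hb b (List.mem_cons_self ..)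
    simp only [List.length_cons, List.range_succ_eq_map, List.filterMap_cons,
      List.flatten_cons, List.filterMap_map]
    have h0 : (b ++ bs.flatten)[j + n * 0]? = some (b.getD j "") := by
      rw [Nat.mul_zero, Nat.add_zero, List.getElem?_append_left (by omega),
        List.getElem?_eq_getElem (by omega), List.getD_eq_getElem _ _ (by omega)]
    rw [h0]
    have hrest : (fun k => (b ++ bs.flatten)[j + n * (k + 1)]?)
        = fun k => bs.flatten[j + n * k]? := by
      funext k
      have h1 : n ≤ n * (k + 1) := Nat.le_mul_of_pos_right n (by omega)
      rw [List.getElem?_append_right (by omega)]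
      congr 1
      rw [hbn, Nat.mul_succ]
      omega
    simp only [Function.comp_def, Nat.succ_eq_add_one, hrest]
    rw [ih (fun b hb' => hb b (List.mem_cons_of_mem _ hb')), List.map_cons]

theorem pv_slice_stride (bs : List (List String)) (n j : Nat) (hj : j < n)
    (hb : ∀ b ∈ bs, b.length = n) :
    PySem.List.slice? bs.flatten (some (j : Int)) none (n : Int)
      = some (bs.map (fun b => b.getD j "")) := by
  have hn : 0 < n := by omega
  have hlen : bs.flatten.length = bs.length * n := by
    induction bs with
    | nil => simp
    | cons b bs ih =>
      simp only [List.flatten_cons, List.length_append, List.length_cons,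
        hb b (List.mem_cons_self ..), ih (fun b hb' => hb b (List.mem_cons_of_mem _ hb'))]
      ring
  unfold PySem.List.slice? PySem.List.sliceIndices
  rw [if_neg (by omega : ¬ (n:Int) = 0)]
  simp only [if_neg (by omega : ¬ (n:Int) < 0), hlen, if_neg (by omega : ¬ (j:Int) < 0),
    if_pos (by omega : (0:Int) < (n:Int))]
  by_cases hm : bs.length = 0
  · obtain rfl : bs = [] := List.length_eq_zero_iff.mp hm
    simp
  · have hmlt : 0 < bs.length := Nat.pos_of_ne_zero hm
    have hjlen : j < bs.length * n := lt_of_lt_of_le hj (Nat.le_mul_of_pos_left n hmlt)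
    have hstart : min (j:Int) ((bs.length * n : Nat) : Int) = (j : Int) := by
      rw [min_eq_left]; exact_mod_cast le_of_lt hjlen
    rw [hstart, if_pos (by exact_mod_cast hjlen : (j:Int) < ((bs.length * n : Nat):Int))]
    have hcount : ((((bs.length * n : Nat):Int) - j + n - 1) / n).toNat = bs.length := by
      have : (((bs.length * n : Nat):Int) - j + n - 1) = ((n - 1 - j : Int) + bs.length * n) := by
        push_cast; ring
      rw [this, Int.add_mul_ediv_right _ _ (by omega : (n:Int) ≠ 0),
        Int.ediv_eq_zero_of_lt (by omega) (by omega)]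
      simp
    rw [hcount]
    rw [show (fun k : Nat => bs.flatten[((j:Int) + n * k).toNat]?)
        = fun k : Nat => bs.flatten[j + n * k]? from by
      funext k; congr 1]
    congr 1
    exact pv_stride_filterMap bs n j hj hb

-- B's range-of-columns map equals the enumerate form that pv_core gives for A.
theorem pv_alt_eq_enum (ks : List String) (rows : List (List String)) :
    (PySem.List.pyRange 0 (ks.length : Int) 1).map
      (fun j => (PySem.List.pyGetD ks j "",
        (PySem.List.slice?
            (rows.flatMap (fun row =>
              (PySem.List.pyRange 0 (ks.length : Int) 1).map (fun i => PySem.List.pyGetD row i "")))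
            (some j) none (ks.length : Int)).getD []))
      = (PySem.List.enumerate ks).map
          (fun p => (p.2, rows.map (fun row => PySem.List.pyGetD row p.1 ""))) := by
  rw [PySem.List.pyRange_zero_natCast, List.map_map]
  simp only [List.map_map, Function.comp_def, PySem.List.pyGetD_natCast]
  apply List.ext_getElem
  · simp [PySem.List.enumerate_eq_zipIdx_map]
  intro i h1 h2
  have hi : i < ks.length := by simpa using h1
  simp only [List.getElem_map, List.getElem_range,
    PySem.List.enumerate_eq_zipIdx_map, List.getElem_zipIdx, zero_add,
    PySem.List.pyGetD_natCast]
  rw [List.flatMap_def, pv_slice_stride (rows.map _) ks.length i hi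
    (by intro b hb; obtain ⟨row, _, rfl⟩ := List.mem_map.mp hb; simp)]
  simp only [Option.getD_some, List.map_map, Function.comp_def, Prod.mk.injEq]
  constructor
  · exact List.getD_eq_getElem ks "" hi
  · apply List.map_congr_left
    intro row _
    rw [List.getD_eq_getElem _ _ (by simpa using hi), List.getElem_map, List.getElem_range]

-- ===== VERDICT (by name: the statement is the Claim_ definition above) =====
theorem get_table_data_from_csv_spec : Claim_equal_get_table_data_from_csv := by
  intro content tn _ hpre
  unfold Spec_get_table_data_from_csv
  unfold Pre_get_table_data_from_csv at hpre
  unfold get_table_data_from_csv get_table_data_from_csv_alt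
  simp only [] at hpre ⊢
  rw [show ((PySem.Str.split? content "Frame").getD []).foldl
      (fun acc el => if el ≠ "" then acc ++ ["Frame" ++ el] else acc) []
      = (((PySem.Str.split? content "Frame").getD []).filter (fun el => el ≠ "")).map
          (fun el => "Frame" ++ el) from by
    simpa using PySem.List.foldl_append_ite (fun el => el ≠ "") (fun el => "Frame" ++ el)
      ((PySem.Str.split? content "Frame").getD []) []]
  set T : List String := (((PySem.Str.split? content "Frame").getD []).filter
      (fun el => el ≠ "")).map (fun el => "Frame" ++ el) with hT
  set segs : List String :=
    (PySem.Str.split? (PySem.List.pyGetD T (tn - 1) "") ",False\n").getD [] with hsegs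
  set keysAll : List String :=
    (PySem.Str.split? (PySem.List.pyGetD segs 0 "") ",").getD [] with hkeysAll
  rw [pv_foldl_if_map_filter (PySem.List.slice segs (some 1))
    (fun el => (PySem.Str.split? el ",").getD [])
    (fun d data =>
      (PySem.List.pyRange 0
          (((keysAll.foldl (fun d k => d.insert k ([] : List String)) PySem.Dict.empty).keys.length : Int)) 1).foldl
        (fun d index =>
          d.modify
            (PySem.List.pyGetD
              (keysAll.foldl (fun d k => d.insert k ([] : List String)) PySem.Dict.empty).keys index "") []
            (fun v => v ++ [PySem.List.pyGetD data index ""])) d)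
    (keysAll.foldl (fun d k => d.insert k ([] : List String)) PySem.Dict.empty)]
  have hslice : PySem.List.slice segs (some 1) none = segs.drop 1 := by
    simpa using PySem.List.slice_from segs (a := 1) (by norm_num)
  rw [hslice] at *
  refine (pv_core keysAll _ ?_).trans ?_
  · intro r hr
    rcases List.mem_filter.mp hr with ⟨hmem, hne⟩
    exact hpre.2 r hmem (by simpa using hne)
  · exact (pv_alt_eq_enum (PySem.Set.ofList keysAll) _).symm
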